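-- pv_equiv track=rewrite | github.com/dmicloiu/weightedhotstuff | weighted_hotstuff.py | construct_valid_quorums
-- ===== SOURCE A (Python) =====
-- def valid_quorum(subset_of_replicas, weights, quorumWeight):
--     sum = 0
--
--     for replicaID in subset_of_replicas:
--         sum += weights[replicaID]
--
--     return sum >= quorumWeight
--
-- def construct_valid_quorums(n, weights, quorum_weight):
--     valid_quorums = []
--
--     subsets = []
--     for i in range(n):
--         subsets.append([i])
--
--     while True:
--         new_subsets = []
--         okay = False
--         for subset in subsets:
--             last_added = subset[-1]
--
--             for i in range(last_added + 1, n):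
--                 new_subset = subset + [i]
--                 okay = True
--
--                 if valid_quorum(new_subset, weights, quorum_weight):
--                     valid_quorums.append(new_subset)
--                 else:
--                     new_subsets.append(new_subset)
--         if not okay:
--             break
--         subsets = new_subsets
--
--     return valid_quorums
-- ===== SOURCE B (Python) =====
-- def construct_valid_quorums(n, weights, quorum_weight):
--     # DFS with running prefix sums and size buckets instead of A's BFS frontier
--     # with per-subset re-summation; same return value, no frontier lists kept.
--     buckets = [[] for _ in range(n + 1)]
--
--     def dfs(subset, total):
--         last = subset[-1]
--         for i in range(last + 1, n):
--             new_total = total + weights[i]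
--             new_subset = subset + [i]
--             if new_total >= quorum_weight:
--                 buckets[len(new_subset)].append(new_subset)
--             else:
--                 dfs(new_subset, new_total)
--
--     for i in range(n - 1):
--         dfs([i], weights[i])
--
--     result = []
--     for bucket in buckets:
--         result += bucket
--     return result
-- ===== Notes on version B (the rewrite author's own statement) =====
-- stated objective: alternative
-- what changed: Replaces A's breadth-first frontier (which re-sums every candidate subset from scratch and keeps a list of all still-invalid subsets per round) by a depth-first recursion that carries the running prefix sum and appends each found quorum into a per-size bucket; concatenating the buckets reproduces A's size-grouped lexicographic output.
import Mathlib
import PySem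

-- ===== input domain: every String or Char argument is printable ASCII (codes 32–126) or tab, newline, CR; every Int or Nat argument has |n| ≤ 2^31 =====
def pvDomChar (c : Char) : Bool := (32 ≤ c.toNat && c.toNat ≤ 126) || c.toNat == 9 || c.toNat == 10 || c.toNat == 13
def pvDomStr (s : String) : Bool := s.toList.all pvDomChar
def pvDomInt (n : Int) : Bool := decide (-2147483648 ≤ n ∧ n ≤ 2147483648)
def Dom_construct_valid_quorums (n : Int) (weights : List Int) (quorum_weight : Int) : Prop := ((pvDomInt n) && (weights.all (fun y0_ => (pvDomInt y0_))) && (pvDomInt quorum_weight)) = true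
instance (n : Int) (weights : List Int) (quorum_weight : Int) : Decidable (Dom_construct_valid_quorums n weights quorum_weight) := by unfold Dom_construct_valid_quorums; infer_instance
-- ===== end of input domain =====

-- B replaces A's breadth-first frontier (re-summing each candidate from scratch) by a
-- depth-first recursion carrying running prefix sums into per-size buckets; same return value.

-- ===== PORT A =====
-- weights[replicaID] ported as pyGet? + getD 0: exact under Pre_ (index always in range there)
def valid_quorum (subset_of_replicas : List Int) (weights : List Int) (quorumWeight : Int) : Bool :=
  decide (quorumWeight ≤ subset_of_replicas.foldl (fun s replicaID => s + (PySem.List.pyGet? weights replicaID).getD 0) 0)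

-- body of A's inner 'for i in range(last_added + 1, n)' loop; state = (valid_quorums, new_subsets, okay)
def aBody (weights : List Int) (q : Int) (subset : List Int)
    (st : List (List Int) × List (List Int) × Bool) (i : Int) :
    List (List Int) × List (List Int) × Bool :=
  let new_subset := subset ++ [i]
  let st := (st.1, st.2.1, true)
  if valid_quorum new_subset weights q then (st.1 ++ [new_subset], st.2.1, st.2.2)
  else (st.1, st.2.1 ++ [new_subset], st.2.2)

-- one pass of A's 'for subset in subsets' loop
def aIter (n : Int) (weights : List Int) (q : Int) (subsets : List (List Int))
    (st0 : List (List Int) × List (List Int) × Bool) : List (List Int) × List (List Int) × Bool :=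
  subsets.foldl (fun st subset =>
    let last_added := (PySem.List.pyGet? subset (-1)).getD 0
    (PySem.List.pyRange (last_added + 1) n 1).foldl (aBody weights q subset) st) st0

-- A's 'while True' loop; the fuel only makes it total (the frontier dies after ≤ n rounds)
def aLoop (n : Int) (weights : List Int) (q : Int) :
    Nat → List (List Int) → List (List Int) → List (List Int)
  | 0, valid_quorums, _ => valid_quorums
  | fuel+1, valid_quorums, subsets =>
    let st := aIter n weights q subsets (valid_quorums, [], false)
    if st.2.2 then aLoop n weights q fuel st.1 st.2.1 else st.1

def construct_valid_quorums (n : Int) (weights : List Int) (quorum_weight : Int) : List (List Int) :=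
  let subsets := (PySem.List.pyRange 0 n 1).map (fun i => [i])
  aLoop n weights quorum_weight (n.toNat + 2) [] subsets

-- ===== PORT B =====
-- Source B's recursive dfs; the fuel only makes it total (each call strictly increases subset[-1])
def bDfs (n : Int) (weights : List Int) (quorum_weight : Int) :
    Nat → List Int → Int → List (List (List Int)) → List (List (List Int))
  | 0, _, _, buckets => buckets
  | fuel+1, subset, total, buckets =>
    let last := (PySem.List.pyGet? subset (-1)).getD 0
    (PySem.List.pyRange (last + 1) n 1).foldl (fun buckets i =>
      let new_total := total + (PySem.List.pyGet? weights i).getD 0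
      let new_subset := subset ++ [i]
      if quorum_weight ≤ new_total then
        buckets.modify new_subset.length (fun b => b ++ [new_subset])
      else bDfs n weights quorum_weight fuel new_subset new_total buckets) buckets

def construct_valid_quorums_alt (n : Int) (weights : List Int) (quorum_weight : Int) : List (List Int) :=
  let buckets := List.replicate (n+1).toNat ([] : List (List Int))
  let buckets := (PySem.List.pyRange 0 (n-1) 1).foldl (fun bks i =>
    bDfs n weights quorum_weight n.toNat [i] ((PySem.List.pyGet? weights i).getD 0) bks) buckets
  buckets.foldl (fun result bucket => result ++ bucket) []

-- ===== PRECONDITION & SPEC =====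
-- Pre_ excludes exactly the inputs where Python A raises IndexError: n ≥ 2 with fewer than n weights
-- (A then always evaluates weights[n-1]); for n ≤ 1 A returns [] without touching weights.
def Pre_construct_valid_quorums (n : Int) (weights : List Int) (quorum_weight : Int) : Prop :=
  n ≤ weights.length ∨ n ≤ 1
instance (n : Int) (weights : List Int) (quorum_weight : Int) : Decidable (Pre_construct_valid_quorums n weights quorum_weight) := by unfold Pre_construct_valid_quorums; infer_instance

def pvWitness_construct_valid_quorums : Int × List Int × Int := (3, [1, 2, 3], 4)

def Spec_construct_valid_quorums (n : Int) (weights : List Int) (quorum_weight : Int) (out : List (List Int)) : Prop := out = construct_valid_quorums_alt n weights quorum_weight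
instance (n : Int) (weights : List Int) (quorum_weight : Int) (out : List (List Int)) : Decidable (Spec_construct_valid_quorums n weights quorum_weight out) := by unfold Spec_construct_valid_quorums; infer_instance

-- ===== CLAIM (what is proved, stated in full; the proofs are below) =====
def Claim_equal_construct_valid_quorums : Prop := ∀ (n : Int) (weights : List Int) (quorum_weight : Int), Dom_construct_valid_quorums n weights quorum_weight → Pre_construct_valid_quorums n weights quorum_weight → Spec_construct_valid_quorums n weights quorum_weight (construct_valid_quorums n weights quorum_weight)

-- ===== LEMMAS AND PROOFS =====

-- w[i] with default (indices are in range under Pre_; the default never changes either side)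
def pvG (w : List Int) (i : Int) : Int := (PySem.List.pyGet? w i).getD 0
-- the sum A's valid_quorum computes
def pvSum (w : List Int) (s : List Int) : Int := s.foldl (fun acc r => acc + pvG w r) 0
-- Bool test "subset reaches the quorum"
def pvVB (w : List Int) (q : Int) (x : List Int) : Bool := decide (q ≤ pvSum w x)
-- subset[-1] with default
def pvLastD (s : List Int) : Int := (PySem.List.pyGet? s (-1)).getD 0
-- the index range both programs extend a subset with
def pvExtR (n : Int) (s : List Int) : List Int := PySem.List.pyRange (pvLastD s + 1) n 1
-- all extensions of s by exactly k more (larger) indices, in lexicographic order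
def pvE (n : Int) : List Int → Nat → List (List Int)
  | s, 0 => [s]
  | s, k+1 => (pvExtR n s).flatMap (fun i => pvE n (s ++ [i]) k)
-- all strictly increasing m-element subsets of range(n), in lexicographic order (m ≥ 1)
def pvS (n : Int) (m : Nat) : List (List Int) :=
  (PySem.List.pyRange 0 n 1).flatMap (fun i => pvE n [i] (m-1))
-- "every prefix sum seen so far, and every further one including the total, stays below q"
def pvCBL (w : List Int) (q : Int) : List Int → Int → Bool
  | [], total => decide (total < q)
  | x :: rest, total => decide (total < q) && pvCBL w q rest (total + pvG w x)
-- "all intermediate prefix sums stay below q and the total reaches q"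
def pvMVL (w : List Int) (q : Int) : List Int → Int → Bool
  | [], total => decide (q ≤ total)
  | x :: rest, total => if q ≤ total then false else pvMVL w q rest (total + pvG w x)
-- chain-bad: every prefix of length 2..len sums below q (A's frontier membership)
def pvCB (w : List Int) (q : Int) : List Int → Bool
  | a :: b :: rest => pvCBL w q rest (pvG w a + pvG w b)
  | _ => true
-- minimal valid: prefixes of length 2..len-1 below q, total reaches q (the output predicate)
def pvMV (w : List Int) (q : Int) : List Int → Bool
  | a :: b :: rest => pvMVL w q rest (pvG w a + pvG w b)
  | _ => false
-- what B's dfs from node s contributes to the bucket k levels below s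
def pvPv (n : Int) (w : List Int) (q : Int) : List Int → Nat → List (List Int)
  | _, 0 => []
  | s, 1 => (pvExtR n s).flatMap (fun i => if pvVB w q (s ++ [i]) then [s ++ [i]] else [])
  | s, k+2 => (pvExtR n s).flatMap (fun i => if pvVB w q (s ++ [i]) then [] else pvPv n w q (s ++ [i]) (k+1))
-- the size-m group of the common output
def pvGroup (n : Int) (w : List Int) (q : Int) (m : Nat) : List (List Int) := (pvS n m).filter (pvMV w q)
-- groups of sizes k+1 .. n, concatenated
def pvTail (n : Int) (w : List Int) (q : Int) (k : Nat) : List (List Int) :=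
  ((List.range' (k+1) (n.toNat - k)).map (fun r => pvGroup n w q r)).flatten

lemma pvLast_append (s : List Int) (i : Int) : pvLastD (s ++ [i]) = i := by
  simp [pvLastD, PySem.List.pyGet?_neg_one_append_singleton]

lemma pvSum_append (w : List Int) (s : List Int) (i : Int) :
    pvSum w (s ++ [i]) = pvSum w s + pvG w i := by
  simp [pvSum, List.foldl_append]

lemma pvSum_cons2 (w : List Int) (a b : Int) (rest : List Int) :
    pvSum w (a :: b :: rest) = rest.foldl (fun acc r => acc + pvG w r) (pvG w a + pvG w b) := by
  simp [pvSum]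

-- loop-level: minimal-validity of (rest ++ [i]) splits into chain-badness of rest and the total test
lemma pvG1 (w : List Int) (q : Int) : ∀ (rest : List Int) (total i : Int),
    pvMVL w q (rest ++ [i]) total
      = (pvCBL w q rest total && decide (q ≤ (rest ++ [i]).foldl (fun t x => t + pvG w x) total)) := by
  intro rest
  induction rest with
  | nil =>
    intro total i
    by_cases h : q ≤ total
    · simp [pvMVL, pvCBL, h, show ¬ total < q by omega]
    · simp [pvMVL, pvCBL, h, show total < q by omega]
  | cons x rest ih =>
    intro total i
    simp only [List.cons_append, pvMVL, pvCBL, List.foldl_cons]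
    split_ifs with h
    · have : ¬ (total < q) := by omega
      simp [this]
    · have : total < q := by omega
      simp [this, ih]

lemma pvG2 (w : List Int) (q : Int) : ∀ (rest : List Int) (total i : Int),
    pvCBL w q (rest ++ [i]) total
      = (pvCBL w q rest total && decide ((rest ++ [i]).foldl (fun t x => t + pvG w x) total < q)) := by
  intro rest
  induction rest with
  | nil =>
    intro total i
    simp only [pvCBL, List.nil_append, List.foldl_cons, List.foldl_nil]
    rfl
  | cons x rest ih =>
    intro total i
    simp only [List.cons_append, pvCBL, List.foldl_cons, ih, Bool.and_assoc]
    rfl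

-- a subset with a quorum-reaching proper prefix is never minimal valid
lemma pvG3 (w : List Int) (q : Int) : ∀ (rest : List Int) (total : Int) (t : List Int), t ≠ [] →
    pvCBL w q rest total = false → pvMVL w q (rest ++ t) total = false := by
  intro rest
  induction rest with
  | nil =>
    intro total t ht h
    cases t with
    | nil => exact absurd rfl ht
    | cons x t' =>
      simp [pvCBL] at h
      simp [pvMVL]
      intro h'; omega
  | cons x rest ih =>
    intro total t ht h
    simp only [pvCBL, Bool.and_eq_false_iff] at h
    simp only [List.cons_append, pvMVL]
    split_ifs with hq
    · rfl
    · rcases h with h | h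
      · simp at h; omega
      · exact ih _ _ ht h
lemma pvG4 (w : List Int) (q : Int) : ∀ (rest : List Int) (total : Int),
    pvCBL w q rest total = true → pvMVL w q rest total = false := by
  intro rest
  induction rest with
  | nil => intro total h; simp [pvCBL] at h; simp [pvMVL]; omega
  | cons x rest ih =>
    intro total h
    simp only [pvCBL, Bool.and_eq_true] at h
    simp only [pvMVL]
    split_ifs with hq
    · rfl
    · exact ih _ h.2

-- valid_quorum computes pvVB
lemma valid_quorum_eq (w : List Int) (q : Int) (x : List Int) :
    valid_quorum x w q = pvVB w q x := rfl

-- pointwise glue for one extension step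
lemma pvPt1 (w : List Int) (q : Int) (s : List Int) (hs : s ≠ []) (i : Int) :
    (pvCB w q s && pvVB w q (s ++ [i])) = pvMV w q (s ++ [i]) := by
  match s with
  | [a] =>
    show (true && pvVB w q [a, i]) = pvMV w q [a, i]
    simp [pvMV, pvMVL, pvVB, pvSum, pvG]
  | a :: b :: rest =>
    have h1 : (a :: b :: rest) ++ [i] = a :: b :: (rest ++ [i]) := by simp
    rw [h1]
    show (pvCBL w q rest _ && pvVB w q _) = pvMVL w q (rest ++ [i]) _
    rw [pvG1, pvVB, pvSum_cons2, List.foldl_append]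
lemma pvPt2 (w : List Int) (q : Int) (s : List Int) (hs : s ≠ []) (i : Int) :
    (pvCB w q s && !pvVB w q (s ++ [i])) = pvCB w q (s ++ [i]) := by
  match s with
  | [a] =>
    show (true && !pvVB w q [a, i]) = pvCBL w q [] (pvG w a + pvG w i)
    simp only [Bool.true_and, pvCBL, pvVB, pvSum, pvG, List.foldl_cons, List.foldl_nil, zero_add]
    rw [← decide_not, decide_eq_decide]
    omega
  | a :: b :: rest =>
    have h1 : (a :: b :: rest) ++ [i] = a :: b :: (rest ++ [i]) := by simp
    rw [h1]
    show (pvCBL w q rest _ && !pvVB w q _) = pvCBL w q (rest ++ [i]) _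
    rw [pvG2, pvVB, pvSum_cons2, List.foldl_append]
    congr 1
    rw [← decide_not, decide_eq_decide]
    omega

-- chain-bad subsets are not minimal valid (their own total is below q)
lemma pvSelfBad (w : List Int) (q : Int) (s : List Int) (h : pvCB w q s = true) :
    pvMV w q s = false := by
  match s with
  | [] => rfl
  | [a] => rfl
  | a :: b :: rest => exact pvG4 w q rest _ h
-- extensions of a non-chain-bad subset are not minimal valid
lemma pvExtBad (w : List Int) (q : Int) (s t : List Int) (ht : t ≠ [])
    (h : pvCB w q s = false) : pvMV w q (s ++ t) = false := by
  match s with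
  | [] => simp [pvCB] at h
  | [a] => simp [pvCB] at h
  | a :: b :: rest =>
    have h1 : (a :: b :: rest) ++ t = a :: b :: (rest ++ t) := by simp
    rw [h1]
    exact pvG3 w q rest _ t ht h

-- ===== lemmas about pvE / pvS =====
lemma pvE_swap (n : Int) : ∀ (k : Nat) (s : List Int),
    pvE n s (k+1) = (pvE n s k).flatMap (fun t => (pvExtR n t).map (fun i => t ++ [i])) := by
  intro k
  induction k with
  | zero =>
    intro s
    show (pvExtR n s).flatMap (fun i => [s ++ [i]]) = List.flatMap _ [s]
    rw [← List.map_eq_flatMap]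
    simp
  | succ k ih =>
    intro s
    show (pvExtR n s).flatMap (fun i => pvE n (s ++ [i]) (k+1)) = _
    conv_lhs => simp only [ih]
    rw [← List.flatMap_assoc]
    rfl

lemma pvEm1 (n : Int) : ∀ (k : Nat) (s x : List Int), x ∈ pvE n s k →
    ∃ t, x = s ++ t ∧ t.length = k := by
  intro k
  induction k with
  | zero =>
    intro s x hx
    simp only [pvE, List.mem_singleton] at hx
    exact ⟨[], by simp [hx]⟩
  | succ k ih =>
    intro s x hx
    simp only [pvE, List.mem_flatMap] at hx
    obtain ⟨i, hi, hx⟩ := hx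
    obtain ⟨t, rfl, ht⟩ := ih (s ++ [i]) x hx
    exact ⟨i :: t, by simp, by simp [ht]⟩

lemma pvLast_single (i : Int) : pvLastD [i] = i := by
  simp [pvLastD, PySem.List.pyGet?_neg_one]

lemma pvEm2 (n : Int) : ∀ (k : Nat) (s x : List Int), x ∈ pvE n s (k+1) →
    pvLastD s + (k+1) ≤ pvLastD x ∧ pvLastD x < n := by
  intro k
  induction k with
  | zero =>
    intro s x hx
    simp only [pvE, List.mem_flatMap, List.mem_singleton] at hx
    obtain ⟨i, hi, rfl⟩ := hx
    rw [pvLast_append]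
    rw [pvExtR, PySem.List.mem_pyRange_one] at hi
    constructor <;> push_cast <;> omega
  | succ k ih =>
    intro s x hx
    rw [show pvE n s (k+1+1) = (pvExtR n s).flatMap (fun i => pvE n (s ++ [i]) (k+1)) from rfl,
      List.mem_flatMap] at hx
    obtain ⟨i, hi, hx⟩ := hx
    have h2 := ih (s ++ [i]) x hx
    rw [pvLast_append] at h2
    rw [pvExtR, PySem.List.mem_pyRange_one] at hi
    constructor
    · push_cast at h2 ⊢; omega
    · exact h2.2

lemma pvE_nil_of_ge (n : Int) (s : List Int) (h : n ≤ pvLastD s + 1) (k : Nat) :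
    pvE n s (k+1) = [] := by
  simp [pvE, pvExtR, PySem.List.pyRange_one_eq_nil h]

lemma pvPv_nil_of_ge (n : Int) (w : List Int) (q : Int) (s : List Int)
    (h : n ≤ pvLastD s + 1) (k : Nat) : pvPv n w q s k = [] := by
  match k with
  | 0 => rfl
  | 1 => simp [pvPv, pvExtR, PySem.List.pyRange_one_eq_nil h]
  | k+2 => simp [pvPv, pvExtR, PySem.List.pyRange_one_eq_nil h]

lemma pvS_one (n : Int) : pvS n 1 = (PySem.List.pyRange 0 n 1).map (fun i => [i]) := by
  show (PySem.List.pyRange 0 n 1).flatMap (fun i => [[i]]) = _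
  rw [← List.map_eq_flatMap]

lemma pvS_succ (n : Int) (k : Nat) (hk : 1 ≤ k) :
    pvS n (k+1) = (pvS n k).flatMap (fun t => (pvExtR n t).map (fun i => t ++ [i])) := by
  obtain ⟨k', rfl⟩ : ∃ k', k = k' + 1 := ⟨k - 1, by omega⟩
  show (PySem.List.pyRange 0 n 1).flatMap (fun i => pvE n [i] (k'+1)) = _
  rw [show (pvS n (k'+1)) = (PySem.List.pyRange 0 n 1).flatMap (fun i => pvE n [i] k') from rfl]
  conv_lhs => simp only [pvE_swap n k']
  rw [List.flatMap_assoc]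

lemma pvS_mem_ne (n : Int) (m : Nat) (x : List Int) (hx : x ∈ pvS n m) : x ≠ [] := by
  simp only [pvS, List.mem_flatMap] at hx
  obtain ⟨i, _, hx⟩ := hx
  obtain ⟨t, rfl, _⟩ := pvEm1 n _ _ _ hx
  simp

lemma pvS_empty (n : Int) (m : Nat) (hm : n.toNat < m) : pvS n m = [] := by
  by_cases hn : n ≤ 0
  · simp [pvS, PySem.List.pyRange_one_eq_nil hn]
  · rw [pvS, List.flatMap_eq_nil_iff]
    intro i hi
    rw [PySem.List.mem_pyRange_one] at hi
    rw [List.eq_nil_iff_forall_not_mem]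
    intro x hx
    have hm1 : m - 1 = (m - 2) + 1 := by omega
    rw [hm1] at hx
    have h2 := pvEm2 n (m - 2) [i] x hx
    rw [pvLast_single] at h2
    push_cast at h2
    omega

-- ===== A side =====
lemma pvInner_char (w : List Int) (q : Int) (subset : List Int) : ∀ (l : List Int)
    (st : List (List Int) × List (List Int) × Bool),
    l.foldl (aBody w q subset) st
      = (st.1 ++ ((l.map (fun i => subset ++ [i])).filter (pvVB w q)),
         st.2.1 ++ ((l.map (fun i => subset ++ [i])).filter (fun x => !pvVB w q x)),
         st.2.2 || !l.isEmpty) := by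
  intro l
  induction l with
  | nil => intro st; simp
  | cons a l ih =>
    intro st
    simp only [List.foldl_cons, ih, List.map_cons, List.filter_cons, List.isEmpty_cons]
    rw [aBody, valid_quorum_eq]
    cases h : pvVB w q (subset ++ [a]) <;> simp [h]

lemma pvIter_char (n : Int) (w : List Int) (q : Int) : ∀ (subsets : List (List Int))
    (st0 : List (List Int) × List (List Int) × Bool),
    aIter n w q subsets st0
      = (st0.1 ++ subsets.flatMap (fun s => ((pvExtR n s).map (fun i => s ++ [i])).filter (pvVB w q)),
         st0.2.1 ++ subsets.flatMap (fun s => ((pvExtR n s).map (fun i => s ++ [i])).filter (fun x => !pvVB w q x)),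
         st0.2.2 || subsets.any (fun s => !(pvExtR n s).isEmpty)) := by
  intro subsets
  induction subsets with
  | nil => intro st0; simp [aIter]
  | cons s rest ih =>
    intro st0
    have h1 : aIter n w q (s :: rest) st0
        = aIter n w q rest (List.foldl (aBody w q s) st0 (pvExtR n s)) := rfl
    rw [h1, pvInner_char w q s (pvExtR n s) st0, ih]
    simp [List.append_assoc, Bool.or_assoc]

-- the valid-branch exchange: extending the frontier and filtering = filtering all next-size subsets
lemma pvX (n : Int) (w : List Int) (q : Int) : ∀ (l : List (List Int)), (∀ s ∈ l, s ≠ []) →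
    (l.filter (pvCB w q)).flatMap (fun s => ((pvExtR n s).map (fun i => s ++ [i])).filter (pvVB w q))
      = (l.flatMap (fun s => (pvExtR n s).map (fun i => s ++ [i]))).filter (pvMV w q) := by
  intro l
  induction l with
  | nil => intro _; simp
  | cons s rest ih =>
    intro hne
    have hs : s ≠ [] := hne s (by simp)
    have hrest : ∀ x ∈ rest, x ≠ [] := fun x hx => hne x (by simp [hx])
    cases h : pvCB w q s with
    | true =>
      rw [List.filter_cons_of_pos h, List.flatMap_cons, List.flatMap_cons,
        List.filter_append, ih hrest]
      congr 1
      apply List.filter_congr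
      intro x hx
      obtain ⟨i, _, rfl⟩ := List.mem_map.mp hx
      have := pvPt1 w q s hs i
      rw [h] at this; simpa using this
    | false =>
      rw [List.filter_cons_of_neg (by simp [h]), List.flatMap_cons,
        List.filter_append, ih hrest]
      have hnil : (List.filter (pvMV w q) ((pvExtR n s).map (fun i => s ++ [i]))) = [] := by
        rw [List.filter_eq_nil_iff]
        intro x hx
        obtain ⟨i, _, rfl⟩ := List.mem_map.mp hx
        have := pvPt1 w q s hs i
        rw [h] at this; simp at this; simp [this]
      rw [hnil]
      simp

lemma pvY (n : Int) (w : List Int) (q : Int) : ∀ (l : List (List Int)), (∀ s ∈ l, s ≠ []) →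
    (l.filter (pvCB w q)).flatMap (fun s => ((pvExtR n s).map (fun i => s ++ [i])).filter (fun x => !pvVB w q x))
      = (l.flatMap (fun s => (pvExtR n s).map (fun i => s ++ [i]))).filter (pvCB w q) := by
  intro l
  induction l with
  | nil => intro _; simp
  | cons s rest ih =>
    intro hne
    have hs : s ≠ [] := hne s (by simp)
    have hrest : ∀ x ∈ rest, x ≠ [] := fun x hx => hne x (by simp [hx])
    cases h : pvCB w q s with
    | true =>
      rw [List.filter_cons_of_pos h, List.flatMap_cons, List.flatMap_cons,
        List.filter_append, ih hrest]
      congr 1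
      apply List.filter_congr
      intro x hx
      obtain ⟨i, _, rfl⟩ := List.mem_map.mp hx
      have := pvPt2 w q s hs i
      rw [h] at this; simpa using this
    | false =>
      rw [List.filter_cons_of_neg (by simp [h]), List.flatMap_cons,
        List.filter_append, ih hrest]
      have hnil : (List.filter (pvCB w q) ((pvExtR n s).map (fun i => s ++ [i]))) = [] := by
        rw [List.filter_eq_nil_iff]
        intro x hx
        obtain ⟨i, _, rfl⟩ := List.mem_map.mp hx
        have := pvPt2 w q s hs i
        rw [h] at this; simp at this; simp [this]
      rw [hnil]
      simp

lemma pvTail_nil (n : Int) (w : List Int) (q : Int) (k : Nat) (h : n.toNat ≤ k) :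
    pvTail n w q k = [] := by
  simp [pvTail, Nat.sub_eq_zero_of_le h]

lemma pvTail_unfold (n : Int) (w : List Int) (q : Int) (k : Nat) (h : k < n.toNat) :
    pvTail n w q k = pvGroup n w q (k+1) ++ pvTail n w q (k+1) := by
  have h1 : n.toNat - k = (n.toNat - (k+1)) + 1 := by omega
  simp only [pvTail, h1, List.range'_succ, List.map_cons, List.flatten_cons]

lemma pvTail_empty (n : Int) (w : List Int) (q : Int) : ∀ (c k : Nat), 1 ≤ k → n.toNat - k ≤ c →
    (pvS n k).filter (pvCB w q) = [] → pvTail n w q k = [] := by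
  intro c
  induction c with
  | zero => intro k hk hc _; exact pvTail_nil n w q k (by omega)
  | succ c ih =>
    intro k hk hc hf
    by_cases hkn : n.toNat ≤ k
    · exact pvTail_nil n w q k hkn
    · rw [pvTail_unfold n w q k (by omega)]
      have hX := pvX n w q (pvS n k) (fun s hs => pvS_mem_ne n k s hs)
      have hY := pvY n w q (pvS n k) (fun s hs => pvS_mem_ne n k s hs)
      rw [hf] at hX hY
      simp only [List.flatMap_nil] at hX hY
      rw [← pvS_succ n k hk] at hX hY
      have hg : pvGroup n w q (k+1) = [] := by rw [pvGroup, ← hX]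
      rw [hg]
      have := ih (k+1) (by omega) (by omega) (by rw [← hY])
      simpa using this

-- A's while-loop, started on the size-k frontier, emits exactly the groups of sizes k+1..n
lemma pvALoop_eq (n : Int) (w : List Int) (q : Int) : ∀ (fuel k : Nat) (vq : List (List Int)),
    1 ≤ k → n.toNat + 1 - k ≤ fuel →
    aLoop n w q fuel vq ((pvS n k).filter (pvCB w q)) = vq ++ pvTail n w q k := by
  intro fuel
  induction fuel with
  | zero =>
    intro k vq hk hf
    rw [pvTail_nil n w q k (by omega)]
    simp [aLoop]
  | succ fuel ih =>
    intro k vq hk hf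
    have hne : ∀ s ∈ pvS n k, s ≠ [] := fun s hs => pvS_mem_ne n k s hs
    have hX := pvX n w q (pvS n k) hne
    have hY := pvY n w q (pvS n k) hne
    rw [← pvS_succ n k hk] at hX hY
    simp only [aLoop]
    rw [pvIter_char n w q _ _]
    simp only [hX, hY, List.nil_append, Bool.false_or]
    by_cases hok : ((pvS n k).filter (pvCB w q)).any (fun s => !(pvExtR n s).isEmpty) = true
    · -- some subset could be extended: the loop recurses on the next frontier
      rw [if_pos hok]
      -- k+1 ≤ n.toNat since the next-size subset list is nonempty
      obtain ⟨s, hsmem, hsne⟩ := List.any_eq_true.mp hok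
      have hext : pvExtR n s ≠ [] := by
        simpa using hsne
      obtain ⟨i, hi⟩ := List.exists_mem_of_ne_nil _ hext
      have hxmem : s ++ [i] ∈ pvS n (k+1) := by
        rw [pvS_succ n k hk, List.mem_flatMap]
        exact ⟨s, List.mem_of_mem_filter hsmem, List.mem_map.mpr ⟨i, hi, rfl⟩⟩
      have hkn : k + 1 ≤ n.toNat := by
        by_contra hc
        rw [pvS_empty n (k+1) (by omega)] at hxmem
        simp at hxmem
      rw [ih (k+1) _ (by omega) (by omega)]
      rw [pvTail_unfold n w q k (by omega), List.append_assoc]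
      rfl
    · -- no subset can be extended: the loop stops and all later groups are empty
      rw [if_neg hok]
      have hext : ∀ s ∈ (pvS n k).filter (pvCB w q), pvExtR n s = [] := by
        intro s hs
        have h1 := List.mem_filter.mp hs
        have h2 : ∀ x ∈ pvS n k, pvCB w q x = true → pvExtR n x = [] := by simpa using hok
        exact h2 s h1.1 h1.2
      have happ : ((pvS n k).filter (pvCB w q)).flatMap
          (fun s => ((pvExtR n s).map (fun i => s ++ [i])).filter (pvVB w q)) = [] := by
        rw [List.flatMap_eq_nil_iff]
        intro s hs
        rw [hext s hs]
        rfl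
      have hfront : ((pvS n k).filter (pvCB w q)).flatMap
          (fun s => ((pvExtR n s).map (fun i => s ++ [i])).filter (fun x => !pvVB w q x)) = [] := by
        rw [List.flatMap_eq_nil_iff]
        intro s hs
        rw [hext s hs]
        rfl
      have hg1 : (pvS n (k+1)).filter (pvMV w q) = [] := by rw [← hX, happ]
      have hf1 : (pvS n (k+1)).filter (pvCB w q) = [] := by rw [← hY, hfront]
      have htail : pvTail n w q k = [] := by
        by_cases hkn : n.toNat ≤ k
        · exact pvTail_nil n w q k hkn
        · rw [pvTail_unfold n w q k (by omega)]
          rw [show pvGroup n w q (k+1) = (pvS n (k+1)).filter (pvMV w q) from rfl, hg1]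
          rw [pvTail_empty n w q (n.toNat - (k+1)) (k+1) (by omega) (le_refl _) hf1]
          rfl
      rw [hg1, htail]

lemma pvA_eq (n : Int) (w : List Int) (q : Int) :
    construct_valid_quorums n w q = pvTail n w q 1 := by
  show aLoop n w q (n.toNat + 2) [] ((PySem.List.pyRange 0 n 1).map (fun i => [i])) = _
  have hfe : ((PySem.List.pyRange 0 n 1).map (fun i => [i])) = (pvS n 1).filter (pvCB w q) := by
    rw [← pvS_one n]
    symm
    rw [List.filter_eq_self]
    intro x hx
    rw [pvS_one n, List.mem_map] at hx
    obtain ⟨i, _, rfl⟩ := hx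
    rfl
  rw [hfe, pvALoop_eq n w q (n.toNat + 2) 1 [] (le_refl 1) (by omega)]
  rfl

-- ===== B side =====
lemma pvMapIdx_id (l : List (List (List Int))) : l.mapIdx (fun _ b => b) = l := by
  induction l with
  | nil => rfl
  | cons a l ih => simp [List.mapIdx_cons, ih]

lemma pvModify_eq_mapIdx (v : List (List Int)) : ∀ (l : List (List (List Int))) (idx : Nat),
    l.modify idx (fun b => b ++ v) = l.mapIdx (fun j b => if j = idx then b ++ v else b) := by
  intro l
  induction l with
  | nil => intro idx; simp [List.modify_nil]
  | cons a l ih =>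
    intro idx
    cases idx with
    | zero => simp [List.modify_zero_cons, List.mapIdx_cons, pvMapIdx_id]
    | succ m =>
      rw [List.modify_succ_cons, List.mapIdx_cons, if_neg (by omega : ¬ (0 = m + 1)), ih m]
      congr 1
      apply congrArg (List.mapIdx · l)
      funext j b
      simp

-- a fold of mapIdx-append steps is one mapIdx-append of the concatenated contributions
lemma pvFoldlMapIdx (step : List (List (List Int)) → Int → List (List (List Int)))
    (h : Int → Nat → List (List Int)) : ∀ (l : List Int),
    (∀ i ∈ l, ∀ bks, step bks i = bks.mapIdx (fun ℓ b => b ++ h i ℓ)) →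
    ∀ bks, l.foldl step bks = bks.mapIdx (fun ℓ b => b ++ l.flatMap (fun i => h i ℓ)) := by
  intro l
  induction l with
  | nil => intro _ bks; simp [pvMapIdx_id]
  | cons a l ih =>
    intro hstep bks
    simp only [List.foldl_cons]
    rw [hstep a (by simp), ih (fun i hi => hstep i (by simp [hi]))]
    rw [List.mapIdx_mapIdx]
    congr 1
    funext ℓ b
    simp [List.append_assoc]

-- B's dfs appends, level by level, exactly the pvPv contributions
lemma pvDfs_spec (n : Int) (w : List Int) (q : Int) : ∀ (fuel : Nat) (s : List Int) (total : Int)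
    (bks : List (List (List Int))), s ≠ [] → total = pvSum w s → (n - pvLastD s).toNat ≤ fuel →
    bDfs n w q fuel s total bks = bks.mapIdx (fun ℓ b => b ++ pvPv n w q s (ℓ - s.length)) := by
  intro fuel
  induction fuel with
  | zero =>
    intro s total bks hs htot hf
    have hge : n ≤ pvLastD s + 1 := by omega
    show bks = _
    symm
    calc bks.mapIdx (fun ℓ b => b ++ pvPv n w q s (ℓ - s.length))
        = bks.mapIdx (fun _ b => b) := by
          exact congrArg (fun f => List.mapIdx f bks)
            (funext fun ℓ => funext fun b => by
              rw [pvPv_nil_of_ge n w q s hge _, List.append_nil])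
      _ = bks := pvMapIdx_id bks
  | succ fuel ih =>
    intro s total bks hs htot hf
    show (pvExtR n s).foldl (fun bks i =>
        if q ≤ total + pvG w i then
          bks.modify (s ++ [i]).length (fun b => b ++ [s ++ [i]])
        else bDfs n w q fuel (s ++ [i]) (total + pvG w i) bks) bks = _
    rw [pvFoldlMapIdx _
      (fun i ℓ => if q ≤ total + pvG w i then (if ℓ = s.length + 1 then [s ++ [i]] else [])
        else pvPv n w q (s ++ [i]) (ℓ - (s.length + 1)))
      (pvExtR n s) ?hstep bks]
    case hstep =>
      intro i hi bks'
      rw [pvExtR, PySem.List.mem_pyRange_one] at hi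
      by_cases hv : q ≤ total + pvG w i
      · rw [if_pos hv, pvModify_eq_mapIdx]
        exact congrArg (fun f => List.mapIdx f bks')
          (funext fun ℓ => funext fun b => by
            beta_reduce
            rw [if_pos hv]
            by_cases hℓ : ℓ = s.length + 1
            · rw [if_pos (by simpa using hℓ), if_pos hℓ]
            · rw [if_neg (by simpa using hℓ), if_neg hℓ, List.append_nil])
      · rw [if_neg hv,
          ih (s ++ [i]) (total + pvG w i) bks' (by simp) (by rw [htot, pvSum_append])
            (by rw [pvLast_append]; omega)]
        exact congrArg (fun f => List.mapIdx f bks')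
          (funext fun ℓ => funext fun b => by
            beta_reduce
            rw [if_neg hv]
            congr 2
            simp)
    -- now collapse the per-child contributions into pvPv
    exact congrArg (fun f => List.mapIdx f bks)
      (funext fun ℓ => funext fun b => by
        congr 1
        rcases hc : ℓ - s.length with - | k2
        · rw [show pvPv n w q s 0 = [] from rfl, List.flatMap_eq_nil_iff]
          intro i _
          by_cases hv : q ≤ total + pvG w i
          · rw [if_pos hv, if_neg (by omega)]
          · rw [if_neg hv, show ℓ - (s.length + 1) = 0 from by omega]
            rfl
        · rcases k2 with - | m
          · -- ℓ = s.length + 1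
            show _ = (pvExtR n s).flatMap
              (fun i => if pvVB w q (s ++ [i]) then [s ++ [i]] else [])
            congr 1
            funext i
            have hvb : pvVB w q (s ++ [i]) = decide (q ≤ total + pvG w i) := by
              rw [pvVB, pvSum_append, htot]
            by_cases hv : q ≤ total + pvG w i
            · rw [if_pos hv, if_pos (by omega), if_pos (by rw [hvb]; simpa using hv)]
            · rw [if_neg hv, if_neg (by rw [hvb]; simpa using hv),
                show ℓ - (s.length + 1) = 0 from by omega]
              rfl
          · -- ℓ = s.length + m + 2
            show _ = (pvExtR n s).flatMap
              (fun i => if pvVB w q (s ++ [i]) then [] else pvPv n w q (s ++ [i]) (m+1))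
            congr 1
            funext i
            have hvb : pvVB w q (s ++ [i]) = decide (q ≤ total + pvG w i) := by
              rw [pvVB, pvSum_append, htot]
            by_cases hv : q ≤ total + pvG w i
            · rw [if_pos hv, if_neg (by omega), if_pos (by rw [hvb]; simpa using hv)]
            · rw [if_neg hv, if_neg (by rw [hvb]; simpa using hv),
                show ℓ - (s.length + 1) = m + 1 from by omega])

-- pruning: what dfs emits below a chain-bad node is the minimal-valid filter of all its extensions
lemma pvPrune (n : Int) (w : List Int) (q : Int) : ∀ (k : Nat) (s : List Int), s ≠ [] →
    pvCB w q s = true → pvPv n w q s k = (pvE n s k).filter (pvMV w q) := by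
  intro k
  induction k using Nat.strong_induction_on with
  | _ k ihk =>
    rcases k with - | k
    · intro s hs hcb
      show ([] : List (List Int)) = [s].filter (pvMV w q)
      rw [List.filter_singleton, pvSelfBad w q s hcb]
      rfl
    rcases k with - | k
    · intro s hs hcb
      show (pvExtR n s).flatMap (fun i => if pvVB w q (s ++ [i]) then [s ++ [i]] else []) = _
      rw [show pvE n s 1 = (pvExtR n s).flatMap (fun i => [s ++ [i]]) from rfl,
        List.filter_flatMap]
      congr 1
      funext i
      rw [List.filter_singleton]
      have h1 := pvPt1 w q s hs i
      rw [hcb, Bool.true_and] at h1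
      rw [← h1]
      cases hv : pvVB w q (s ++ [i]) <;> simp [hv]
    · intro s hs hcb
      show (pvExtR n s).flatMap
          (fun i => if pvVB w q (s ++ [i]) then [] else pvPv n w q (s ++ [i]) (k+1)) = _
      rw [show pvE n s (k+2) = (pvExtR n s).flatMap (fun i => pvE n (s ++ [i]) (k+1)) from rfl,
        List.filter_flatMap]
      congr 1
      funext i
      have h2 := pvPt2 w q s hs i
      rw [hcb, Bool.true_and] at h2
      cases hv : pvVB w q (s ++ [i]) with
      | true =>
        rw [if_pos rfl]
        have hcbf : pvCB w q (s ++ [i]) = false := by rw [← h2, hv]; rfl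
        symm
        rw [List.filter_eq_nil_iff]
        intro x hx
        obtain ⟨t, rfl, htl⟩ := pvEm1 n (k+1) (s ++ [i]) x hx
        have ht : t ≠ [] := by intro hh; rw [hh] at htl; simp at htl
        have hb := pvExtBad w q (s ++ [i]) t ht hcbf
        simpa using hb
      | false =>
        rw [if_neg (by simp [hv])]
        have hcbt : pvCB w q (s ++ [i]) = true := by rw [← h2, hv]; rfl
        exact ihk (k+1) (by omega) (s ++ [i]) (by simp) hcbt

lemma pvFoldl_flatten (l : List (List (List Int))) : ∀ (acc : List (List Int)),
    l.foldl (fun result bucket => result ++ bucket) acc = acc ++ l.flatten := by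
  induction l with
  | nil => intro acc; simp
  | cons a l ih => intro acc; simp [List.foldl_cons, ih, List.append_assoc]

lemma pvReplicate_mapIdx : ∀ (m : Nat),
    ∀ (g' : Nat → List (List Int)), (List.replicate m ([] : List (List Int))).mapIdx (fun ℓ b => b ++ g' ℓ)
      = (List.range m).map g' := by
  intro m
  induction m with
  | zero => intro g'; rfl
  | succ m ih =>
    intro g'
    rw [List.replicate_succ, List.mapIdx_cons, List.range_succ_eq_map]
    simp only [List.nil_append, List.map_cons, List.map_map]
    congr 1
    exact ih (fun i => g' (i+1))

lemma pvB_eq (n : Int) (w : List Int) (q : Int) :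
    construct_valid_quorums_alt n w q = pvTail n w q 1 := by
  have hroot : ∀ i ∈ PySem.List.pyRange 0 (n-1) 1, ∀ bks,
      bDfs n w q n.toNat [i] (pvG w i) bks
        = bks.mapIdx (fun ℓ b => b ++ pvPv n w q [i] (ℓ - [i].length)) := by
    intro i hi bks
    rw [PySem.List.mem_pyRange_one] at hi
    exact pvDfs_spec n w q n.toNat [i] (pvG w i) bks (by simp)
      (by simp [pvSum]) (by rw [pvLast_single]; omega)
  show ((PySem.List.pyRange 0 (n-1) 1).foldl
      (fun bks i => bDfs n w q n.toNat [i] (pvG w i) bks)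
      (List.replicate (n+1).toNat [])).foldl (fun result bucket => result ++ bucket) [] = _
  rw [pvFoldlMapIdx (fun bks i => bDfs n w q n.toNat [i] (pvG w i) bks)
      (fun i ℓ => pvPv n w q [i] (ℓ - [i].length)) (PySem.List.pyRange 0 (n-1) 1)
      hroot (List.replicate (n+1).toNat []),
    pvReplicate_mapIdx, pvFoldl_flatten, List.nil_append]
  by_cases hn : 1 ≤ n
  · -- bucket ℓ holds exactly the size-ℓ group; buckets 0 and 1 stay empty
    have hC : ∀ ℓ : Nat, 2 ≤ ℓ →
        (PySem.List.pyRange 0 (n-1) 1).flatMap (fun i => pvPv n w q [i] (ℓ - [i].length))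
          = pvGroup n w q ℓ := by
      intro ℓ hℓ
      obtain ⟨m, rfl⟩ : ∃ m, ℓ = m + 2 := ⟨ℓ - 2, by omega⟩
      have hsplit := PySem.List.pyRange_one_append 0 (n-1) n (by omega) (by omega)
      have hsing : PySem.List.pyRange (n-1) n 1 = [n-1] := by
        have h0 := PySem.List.pyRange_one_singleton (n-1)
        rw [sub_add_cancel] at h0
        exact h0
      rw [pvGroup, pvS, List.filter_flatMap, hsplit, List.flatMap_append, hsing]
      have hlast : ((pvE n [n-1] (m+2-1)).filter (pvMV w q)) = [] := by
        rw [show (m+2-1) = (m+1) from rfl,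
          pvE_nil_of_ge n [n-1] (by rw [pvLast_single]; omega) m]
        rfl
      rw [List.flatMap_singleton, hlast, List.append_nil]
      congr 1
      funext i
      exact pvPrune n w q (m+1) [i] (by simp) rfl
    have hNt : (n+1).toNat = n.toNat + 1 := by omega
    rw [hNt, List.range_eq_range', show n.toNat + 1 = 2 + (n.toNat - 1) from by omega,
      ← List.range'_append (s := 0) (m := 2) (n := n.toNat - 1) (step := 1),
      List.map_append, List.flatten_append]
    have hfirst : ((List.range' 0 2).map (fun ℓ =>
        (PySem.List.pyRange 0 (n-1) 1).flatMap (fun i => pvPv n w q [i] (ℓ - [i].length)))).flatten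
          = [] := by
      rw [show List.range' 0 2 = [0, 1] from rfl]
      simp [pvPv]
    rw [hfirst, List.nil_append, pvTail]
    congr 1
    apply List.map_congr_left
    intro ℓ hℓ
    rw [List.mem_range'_1] at hℓ
    exact hC ℓ (by omega)
  · -- n ≤ 0: no subsets of size ≥ 2 exist, both sides are []
    rw [pvTail_nil n w q 1 (by omega),
      PySem.List.pyRange_one_eq_nil (show n - 1 ≤ 0 from by omega)]
    simp

-- ===== VERDICT (by name: the statement is the Claim_ definition above) =====
theorem construct_valid_quorums_spec : Claim_equal_construct_valid_quorums := by
  intro n weights quorum_weight _ _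
  unfold Spec_construct_valid_quorums
  rw [pvA_eq, pvB_eq]
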